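-- pv_equiv track=rewrite | github.com/fazz/aoc | aoc2017.py/day24.py | calc
-- ===== SOURCE A (Python) =====
-- def find_candidates(free, elements, visited):
--     for (e1, e2) in elements:
--         if (e1 == free or e2 == free) and (e1, e2) not in visited:
--             yield (e1, e2)
--
-- def calc(free, strength, depth, elements, visited):
--     found = False
--     for (e1, e2) in find_candidates(free, elements, visited):
--         found = True
--         c = (e1, e2)
--         nextfree = e1 if free == e2 else e2
--         for r in calc(nextfree, strength + e1 + e2, depth + 1, elements, visited.union((c,))):
--             yield r
--
--     if not found:
--         yield (strength, depth)
-- ===== SOURCE B (Python) =====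
-- def calc(free, strength, depth, elements, visited):
--     # Iterative DFS with an explicit stack of frames instead of recursion/generators.
--     out = []
--     stack = [(free, strength, depth, visited)]
--     while stack:
--         f, s, d, v = stack.pop()
--         cands = [e for e in elements
--                  if (e[0] == f or e[1] == f) and e not in v]
--         if not cands:
--             out.append((s, d))
--         else:
--             # push in reverse so children pop in original candidate order
--             for (e1, e2) in reversed(cands):
--                 stack.append((e1 if f == e2 else e2,
--                               s + e1 + e2,
--                               d + 1,
--                               v | {(e1, e2)}))
--     return out
-- ===== Notes on version B (the rewrite author's own statement) =====
-- stated objective: alternative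
-- what changed: The recursive generator (calc recursing into itself and re-yielding) is replaced by an iterative DFS over an explicit stack of (free, strength, depth, visited) frames, pushing children in reverse so leaves are emitted in the identical order.
import Mathlib
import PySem

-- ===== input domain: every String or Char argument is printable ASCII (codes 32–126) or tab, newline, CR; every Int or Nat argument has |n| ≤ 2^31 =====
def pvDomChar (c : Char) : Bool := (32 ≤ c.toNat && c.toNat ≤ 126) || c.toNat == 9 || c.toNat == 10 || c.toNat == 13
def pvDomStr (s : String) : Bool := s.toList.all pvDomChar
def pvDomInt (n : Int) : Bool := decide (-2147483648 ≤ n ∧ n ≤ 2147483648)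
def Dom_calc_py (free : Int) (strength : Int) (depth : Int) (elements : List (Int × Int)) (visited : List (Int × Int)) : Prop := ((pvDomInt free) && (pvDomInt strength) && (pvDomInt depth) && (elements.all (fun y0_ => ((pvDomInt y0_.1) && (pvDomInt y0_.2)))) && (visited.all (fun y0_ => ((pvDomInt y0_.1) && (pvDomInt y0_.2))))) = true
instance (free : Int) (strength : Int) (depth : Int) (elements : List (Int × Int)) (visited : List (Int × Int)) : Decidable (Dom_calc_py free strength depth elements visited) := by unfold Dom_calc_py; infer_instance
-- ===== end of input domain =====

-- B replaces the recursive generator by an iterative DFS over an explicit stack of frames (alternative decomposition, same cost).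


-- ===== PORT A =====
-- find_candidates: the generator filters elements by the connect/not-visited predicate
def pvFindCandidates (free : Int) (elements : List (Int × Int)) (visited : List (Int × Int)) : List (Int × Int) :=
  elements.filter (fun e => (e.1 == free || e.2 == free) && !(PySem.Set.contains visited e))

theorem pvFilterLt {α : Type} (p q : α → Bool) (l : List α)
    (himp : ∀ x, q x = true → p x = true) (c : α) (hc : c ∈ l)
    (hp : p c = true) (hq : q c = false) :
    (l.filter q).length < (l.filter p).length := by
  have hsub : (l.filter q).Sublist (l.filter p) := List.monotone_filter_right l himp
  refine Nat.lt_of_le_of_ne hsub.length_le (fun hlen => ?_)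
  have heq := hsub.eq_of_length hlen
  have hcp : c ∈ l.filter p := List.mem_filter.mpr ⟨hc, hp⟩
  rw [← heq] at hcp
  have := (List.mem_filter.mp hcp).2
  simp [hq] at this

theorem pv_cand_facts (f : Int) (elements v : List (Int × Int)) (c : Int × Int)
    (hc : c ∈ pvFindCandidates f elements v) :
    c ∈ elements ∧ PySem.Set.contains v c = false := by
  have h := List.mem_filter.mp hc
  refine ⟨h.1, ?_⟩
  have := h.2
  simp at this
  simpa [PySem.Set.contains_eq_decide] using this.2

-- measure used only for termination: elements not yet in visited
def pvM (elements : List (Int × Int)) (visited : List (Int × Int)) : Nat :=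
  (elements.filter (fun e => !(PySem.Set.contains visited e))).length

theorem pvM_add_lt (elements visited : List (Int × Int)) (c : Int × Int)
    (hc : c ∈ elements) (hv : PySem.Set.contains visited c = false) :
    pvM elements (PySem.Set.add visited c) < pvM elements visited := by
  unfold pvM
  refine pvFilterLt _ _ elements ?_ c hc ?_ ?_
  · intro x hx
    simp [PySem.Set.mem_add] at hx ⊢
    tauto
  · simpa [PySem.Set.contains_eq_decide] using hv
  · simp [PySem.Set.mem_add]

theorem pvM_cand_lt (free : Int) (elements visited : List (Int × Int)) (c : Int × Int)
    (hc : c ∈ pvFindCandidates free elements visited) :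
    pvM elements (PySem.Set.add visited c) < pvM elements visited := by
  obtain ⟨h1, h2⟩ := pv_cand_facts free elements visited c hc
  exact pvM_add_lt elements visited c h1 h2

def calc_py (free : Int) (strength : Int) (depth : Int) (elements : List (Int × Int)) (visited : List (Int × Int)) : List (Int × Int) :=
  let cands := pvFindCandidates free elements visited
  if cands.isEmpty then [(strength, depth)]       -- 'found' stayed False: yield (strength, depth)
  else cands.attach.flatMap (fun c =>
    calc_py (if free == c.1.2 then c.1.1 else c.1.2) (strength + c.1.1 + c.1.2) (depth + 1)
      elements (PySem.Set.union visited [c.1]))   -- visited.union((c,))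
termination_by pvM elements visited
decreasing_by
  exact pvM_cand_lt free elements visited c.1 c.2

-- ===== PORT B =====
-- weight of a stack, used only for termination of the DFS loop
def pvW (elements : List (Int × Int)) (stack : List (Int × Int × Int × List (Int × Int))) : Nat :=
  (stack.map (fun fr => (elements.length + 1) ^ pvM elements fr.2.2.2)).sum

theorem pvW_pop (elements : List (Int × Int)) (fr : Int × Int × Int × List (Int × Int))
    (rest : List (Int × Int × Int × List (Int × Int))) :
    pvW elements rest < pvW elements (fr :: rest) := by
  unfold pvW
  simp only [List.map_cons, List.sum_cons]
  have : 0 < (elements.length + 1) ^ pvM elements fr.2.2.2 := Nat.pow_pos (Nat.succ_pos _)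
  omega

theorem pvW_push (elements : List (Int × Int)) (f s d : Int) (v : List (Int × Int))
    (rest : List (Int × Int × Int × List (Int × Int)))
    (hne : (pvFindCandidates f elements v).isEmpty = false) :
    pvW elements (((pvFindCandidates f elements v).map
        (fun c => (if f == c.2 then c.1 else c.2, s + c.1 + c.2, d + 1, PySem.Set.add v c))) ++ rest)
      < pvW elements ((f, s, d, v) :: rest) := by
  unfold pvW
  simp only [List.map_append, List.sum_append, List.map_cons, List.sum_cons, List.map_map]
  set cands := pvFindCandidates f elements v with hcands
  set E := elements.length with hE
  set m := pvM elements v with hm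
  -- m ≥ 1: some candidate is a not-yet-visited element
  obtain ⟨c0, hc0⟩ : ∃ c0, c0 ∈ cands := List.isEmpty_eq_false_iff_exists_mem.mp hne
  obtain ⟨hc0e, hc0v⟩ := pv_cand_facts f elements v c0 hc0
  have hm1 : 1 ≤ m := by
    have hnotv : c0 ∉ v := by
      simpa [PySem.Set.contains_eq_decide] using hc0v
    have hmem : c0 ∈ elements.filter (fun e => !(PySem.Set.contains v e)) :=
      List.mem_filter.mpr ⟨hc0e, by simp [hnotv]⟩
    have hpos : 0 < pvM elements v := by
      unfold pvM; exact List.length_pos_of_mem hmem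
    omega
  refine Nat.add_lt_add_right ?_ _
  -- each child term is ≤ (E+1)^(m-1)
  have hterm : ∀ c ∈ cands,
      (E + 1) ^ pvM elements (PySem.Set.add v c) ≤ (E + 1) ^ (m - 1) := by
    intro c hc
    obtain ⟨hce, hcv⟩ := pv_cand_facts f elements v c hc
    have hlt : pvM elements (PySem.Set.add v c) < m := pvM_add_lt elements v c hce hcv
    exact Nat.pow_le_pow_right (Nat.succ_pos _) (by omega)
  have hsum : (cands.map (fun c => (E + 1) ^ pvM elements (PySem.Set.add v c))).sum
      ≤ cands.length * (E + 1) ^ (m - 1) := by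
    have := List.sum_le_card_nsmul (cands.map (fun c => (E + 1) ^ pvM elements (PySem.Set.add v c)))
      ((E + 1) ^ (m - 1)) (by
        intro x hx
        obtain ⟨c, hc, rfl⟩ := List.mem_map.mp hx
        exact hterm c hc)
    simpa using this
  have hlen : cands.length ≤ E := by
    have : cands.length ≤ elements.length := List.length_filter_le _ _
    simpa [hE] using this
  have hpow : 0 < (E + 1) ^ (m - 1) := Nat.pow_pos (Nat.succ_pos _)
  calc (cands.map (fun c => (E + 1) ^ pvM elements (PySem.Set.add v c))).sum
      ≤ cands.length * (E + 1) ^ (m - 1) := hsum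
    _ ≤ E * (E + 1) ^ (m - 1) := Nat.mul_le_mul_right _ hlen
    _ < (E + 1) * (E + 1) ^ (m - 1) := (Nat.mul_lt_mul_right hpow).mpr (Nat.lt_succ_self E)
    _ = (E + 1) ^ m := by rw [← pow_succ']; congr 1; omega

def pvDfs (elements : List (Int × Int)) (stack : List (Int × Int × Int × List (Int × Int)))
    (out : List (Int × Int)) : List (Int × Int) :=
  match stack with
  | [] => out
  | (f, s, d, v) :: rest =>
    let cands := pvFindCandidates f elements v
    if h : cands.isEmpty then pvDfs elements rest (out ++ [(s, d)])
    else
      -- children pushed in reverse, so they pop in candidate order: children ++ rest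
      pvDfs elements ((cands.map
          (fun c => (if f == c.2 then c.1 else c.2, s + c.1 + c.2, d + 1, PySem.Set.add v c))) ++ rest) out
termination_by pvW elements stack
decreasing_by
  · exact pvW_pop elements (f, s, d, v) rest
  · exact pvW_push elements f s d v rest (by simpa using h)

def calc_py_alt (free : Int) (strength : Int) (depth : Int) (elements : List (Int × Int)) (visited : List (Int × Int)) : List (Int × Int) :=
  pvDfs elements [(free, strength, depth, visited)] []

-- ===== PRECONDITION & SPEC =====
def Spec_calc_py (free : Int) (strength : Int) (depth : Int) (elements : List (Int × Int)) (visited : List (Int × Int)) (out : List (Int × Int)) : Prop := out = calc_py_alt free strength depth elements visited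
instance (free : Int) (strength : Int) (depth : Int) (elements : List (Int × Int)) (visited : List (Int × Int)) (out : List (Int × Int)) : Decidable (Spec_calc_py free strength depth elements visited out) := by unfold Spec_calc_py; infer_instance

-- ===== CLAIM (what is proved, stated in full; the proofs are below) =====
def Claim_equal_calc_py : Prop := ∀ (free : Int) (strength : Int) (depth : Int) (elements : List (Int × Int)) (visited : List (Int × Int)), Dom_calc_py free strength depth elements visited → Spec_calc_py free strength depth elements visited (calc_py free strength depth elements visited)

-- ===== LEMMAS AND PROOFS =====

theorem pv_union_single (v : List (Int × Int)) (c : Int × Int) :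
    PySem.Set.union v [c] = PySem.Set.add v c := rfl




theorem calc_py_eq (f s d : Int) (e v : List (Int × Int)) :
    calc_py f s d e v =
      if (pvFindCandidates f e v).isEmpty then [(s, d)]
      else (pvFindCandidates f e v).flatMap (fun c =>
        calc_py (if f == c.2 then c.1 else c.2) (s + c.1 + c.2) (d + 1) e (PySem.Set.add v c)) := by
  rw [calc_py]
  simp only [List.flatMap_subtype, List.unattach_attach, pv_union_single]

theorem pvDfs_spec (elements : List (Int × Int)) (stack : List (Int × Int × Int × List (Int × Int)))
    (out : List (Int × Int)) :
    pvDfs elements stack out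
      = out ++ stack.flatMap (fun fr => calc_py fr.1 fr.2.1 fr.2.2.1 elements fr.2.2.2) := by
  induction stack, out using pvDfs.induct elements with
  | case1 out => simp [pvDfs]
  | case2 out f s d v rest cands hemp ih =>
    rw [pvDfs, dif_pos hemp, ih]
    simp only [List.flatMap_cons]
    rw [calc_py_eq, if_pos hemp]
    simp
  | case3 out f s d v rest cands hemp ih =>
    rw [pvDfs, dif_neg hemp]
    simp only [dite_eq_ite] at ih
    rw [ih]
    simp only [List.flatMap_cons]
    rw [calc_py_eq, if_neg hemp]
    simp only [List.flatMap_append, List.flatMap_map]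
    rfl

-- ===== VERDICT (by name: the statement is the Claim_ definition above) =====
theorem calc_py_spec : Claim_equal_calc_py := by
  intro free strength depth elements visited _
  unfold Spec_calc_py calc_py_alt
  rw [pvDfs_spec]
  simp
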